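-- pv_equiv track=rewrite | github.com/lakefusionai/lakefusion-app-deploy | dbx_pipeline_artifacts/src/maven-core-deduplication/Process Delete.py | apply_recency_strategy
-- ===== SOURCE A (Python) =====
-- def apply_recency_strategy(attribute, unified_records, unified_datasets, initial_value=None, initial_source=None, ignore_null=False):
--     result_value = initial_value
--     result_source = initial_source
--
--     # Apply ignore_null to initial value
--     if ignore_null and (result_value is None or result_value == ""):
--         result_value = None
--         result_source = None
--
--     for idx in range(len(unified_records) - 1, -1, -1):
--         if idx < len(unified_datasets):
--             record_value = unified_records[idx].get(attribute)
--             if record_value is not None: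
--                 if not ignore_null or record_value != "":
--                     result_value = record_value
--                     result_source = unified_datasets[idx]
--                     break
--
--     return result_value, result_source
-- ===== SOURCE B (Python) =====
-- def apply_recency_strategy(attribute, unified_records, unified_datasets, initial_value=None, initial_source=None, ignore_null=False):
--     if ignore_null and (initial_value is None or initial_value == ""):
--         result = (None, None)
--     else:
--         result = (initial_value, initial_source)
--     # forward keep-latest accumulation: zip truncates exactly where A's
--     # 'idx < len(unified_datasets)' guard would skip
--     for record, source in zip(unified_records, unified_datasets):
--         value = record.get(attribute)
--         if value is not None and (not ignore_null or value != ""):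
--             result = (value, source)
--     return result
-- ===== Notes on version B (the rewrite author's own statement) =====
-- stated objective: simpler
-- what changed: Backward index loop with early break replaced by a forward keep-latest accumulation over zip(unified_records, unified_datasets), removing index arithmetic and the bounds guard.
import Mathlib
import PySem

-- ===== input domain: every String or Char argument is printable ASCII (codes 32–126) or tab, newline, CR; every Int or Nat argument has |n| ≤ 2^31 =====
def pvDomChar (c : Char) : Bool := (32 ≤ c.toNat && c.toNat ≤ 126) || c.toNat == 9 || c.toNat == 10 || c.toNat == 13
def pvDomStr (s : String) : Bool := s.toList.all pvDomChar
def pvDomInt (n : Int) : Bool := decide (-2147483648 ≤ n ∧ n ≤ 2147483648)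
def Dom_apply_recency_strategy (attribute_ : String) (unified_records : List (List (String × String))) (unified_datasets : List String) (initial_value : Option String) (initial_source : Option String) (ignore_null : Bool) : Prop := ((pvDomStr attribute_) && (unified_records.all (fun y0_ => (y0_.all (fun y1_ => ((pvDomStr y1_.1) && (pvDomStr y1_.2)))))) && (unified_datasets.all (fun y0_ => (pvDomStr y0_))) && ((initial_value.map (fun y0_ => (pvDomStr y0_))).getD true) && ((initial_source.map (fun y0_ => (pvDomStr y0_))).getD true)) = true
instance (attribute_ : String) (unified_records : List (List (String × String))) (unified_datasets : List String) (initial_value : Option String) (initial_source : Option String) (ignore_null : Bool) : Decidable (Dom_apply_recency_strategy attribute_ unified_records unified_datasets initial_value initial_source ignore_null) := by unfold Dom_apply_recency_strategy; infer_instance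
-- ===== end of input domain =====

-- B replaces A's backward index loop with early break by a forward keep-latest
-- accumulation over zip(unified_records, unified_datasets) (objective: simpler).

-- ===== PORT A =====
-- A's backward for-loop with break, as recursion over the descending index list
def arsLoopA (attribute_ : String) (unified_records : List (List (String × String))) (unified_datasets : List String) (ignore_null : Bool) : List Int → (Option String × Option String) → Option String × Option String
  | [], acc => acc
  | idx :: rest, acc =>
    if idx < (unified_datasets.length : Int) then
      match PySem.List.pyGet? unified_records idx with
      | none => arsLoopA attribute_ unified_records unified_datasets ignore_null rest acc  -- unreachable: idx comes from range(len-1,-1,-1)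
      | some rec =>
        match (PySem.Dict.mk rec).get? attribute_ with
        | none => arsLoopA attribute_ unified_records unified_datasets ignore_null rest acc
        | some record_value =>
          if !ignore_null || record_value ≠ "" then
            (some record_value, PySem.List.pyGet? unified_datasets idx)  -- break
          else arsLoopA attribute_ unified_records unified_datasets ignore_null rest acc
    else arsLoopA attribute_ unified_records unified_datasets ignore_null rest acc

def apply_recency_strategy (attribute_ : String) (unified_records : List (List (String × String))) (unified_datasets : List String) (initial_value : Option String) (initial_source : Option String) (ignore_null : Bool) : Option String × Option String :=
  let init : Option String × Option String :=
    if ignore_null && (initial_value == none || initial_value == some "") then (none, none)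
    else (initial_value, initial_source)
  arsLoopA attribute_ unified_records unified_datasets ignore_null
    (PySem.List.pyRange ((unified_records.length : Int) - 1) (-1) (-1)) init

-- ===== PORT B =====
def apply_recency_strategy_alt (attribute_ : String) (unified_records : List (List (String × String))) (unified_datasets : List String) (initial_value : Option String) (initial_source : Option String) (ignore_null : Bool) : Option String × Option String :=
  let init : Option String × Option String :=
    if ignore_null && (initial_value == none || initial_value == some "") then (none, none)
    else (initial_value, initial_source)
  (unified_records.zip unified_datasets).foldl
    (fun acc p =>
      match (PySem.Dict.mk p.1).get? attribute_ with
      | some v => if !ignore_null || v ≠ "" then (some v, some p.2) else acc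
      | none => acc) init

-- ===== PRECONDITION & SPEC =====
def Spec_apply_recency_strategy (attribute_ : String) (unified_records : List (List (String × String))) (unified_datasets : List String) (initial_value : Option String) (initial_source : Option String) (ignore_null : Bool) (out : Option String × Option String) : Prop := out = apply_recency_strategy_alt attribute_ unified_records unified_datasets initial_value initial_source ignore_null
instance (attribute_ : String) (unified_records : List (List (String × String))) (unified_datasets : List String) (initial_value : Option String) (initial_source : Option String) (ignore_null : Bool) (out : Option String × Option String) : Decidable (Spec_apply_recency_strategy attribute_ unified_records unified_datasets initial_value initial_source ignore_null out) := by unfold Spec_apply_recency_strategy; infer_instance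

-- ===== CLAIM (what is proved, stated in full; the proofs are below) =====
def Claim_equal_apply_recency_strategy : Prop := ∀ (attribute_ : String) (unified_records : List (List (String × String))) (unified_datasets : List String) (initial_value : Option String) (initial_source : Option String) (ignore_null : Bool), Dom_apply_recency_strategy attribute_ unified_records unified_datasets initial_value initial_source ignore_null → Spec_apply_recency_strategy attribute_ unified_records unified_datasets initial_value initial_source ignore_null (apply_recency_strategy attribute_ unified_records unified_datasets initial_value initial_source ignore_null)

-- ===== LEMMAS AND PROOFS =====

-- first-match-from-the-front over a (record, source) pair list: the common form
def arsPick (attribute_ : String) (ignore_null : Bool) : List (List (String × String) × String) → (Option String × Option String) → Option String × Option String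
  | [], acc => acc
  | p :: rest, acc =>
    match (PySem.Dict.mk p.1).get? attribute_ with
    | some v => if !ignore_null || v ≠ "" then (some v, some p.2) else arsPick attribute_ ignore_null rest acc
    | none => arsPick attribute_ ignore_null rest acc

theorem arsPick_foldl (attribute_ : String) (ignore_null : Bool) (L : List (List (String × String) × String)) (init : Option String × Option String) :
    L.foldl (fun acc p =>
      match (PySem.Dict.mk p.1).get? attribute_ with
      | some v => if !ignore_null || v ≠ "" then (some v, some p.2) else acc
      | none => acc) init = arsPick attribute_ ignore_null L.reverse init := by
  induction L using List.reverseRecOn with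
  | nil => simp [arsPick]
  | append_singleton M x ih =>
    rw [List.foldl_append, List.reverse_append]
    simp only [List.foldl_cons, List.foldl_nil, List.reverse_cons, List.reverse_nil,
      List.nil_append, List.cons_append, ih]
    rfl

theorem arsLoopA_eq_pick (attribute_ : String) (unified_records : List (List (String × String))) (unified_datasets : List String) (ignore_null : Bool) (j : Nat) (hj : j ≤ unified_records.length) (acc : Option String × Option String) :
    arsLoopA attribute_ unified_records unified_datasets ignore_null
      (PySem.List.pyRange ((j : Int) - 1) (-1) (-1)) acc
      = arsPick attribute_ ignore_null
          (((unified_records.zip unified_datasets).take j).reverse) acc := by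
  induction j with
  | zero =>
    rw [PySem.List.pyRange_neg_one_eq_nil (by omega)]
    simp [arsLoopA, arsPick]
  | succ j ih =>
    have hjr : j < unified_records.length := by omega
    rw [show ((j + 1 : Nat) : Int) - 1 = (j : Int) by push_cast; ring,
      PySem.List.pyRange_neg_one_cons (by omega)]
    by_cases hd : j < unified_datasets.length
    · have hz : j < (unified_records.zip unified_datasets).length := by
        simp [List.length_zip]; omega
      rw [List.take_add_one, List.getElem?_eq_getElem hz, List.getElem_zip]
      simp only [arsLoopA, Option.toList_some, List.reverse_append,
        List.reverse_cons, List.reverse_nil, List.nil_append, List.cons_append]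
      rw [if_pos (by exact_mod_cast hd), PySem.List.pyGet?_natCast,
        List.getElem?_eq_getElem hjr]
      simp only [arsPick]
      cases h : (PySem.Dict.mk unified_records[j]).get? attribute_ with
      | none => exact ih (by omega)
      | some v =>
        by_cases hv : (!ignore_null || v ≠ "") = true
        · simp only [hv, if_true]
          rw [PySem.List.pyGet?_natCast, List.getElem?_eq_getElem hd]
        · simp only [hv]; exact ih (by omega)
    · have hz : (unified_records.zip unified_datasets).length ≤ j := by
        simp [List.length_zip]; omega
      rw [List.take_of_length_le (by omega)]
      simp only [arsLoopA]
      rw [if_neg (by omega)]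
      have := ih (by omega)
      rwa [List.take_of_length_le hz] at this

-- ===== VERDICT (by name: the statement is the Claim_ definition above) =====
theorem apply_recency_strategy_spec : Claim_equal_apply_recency_strategy := by
  intro attribute_ unified_records unified_datasets initial_value initial_source ignore_null _
  unfold Spec_apply_recency_strategy apply_recency_strategy apply_recency_strategy_alt
  rw [arsPick_foldl, arsLoopA_eq_pick attribute_ unified_records unified_datasets ignore_null unified_records.length le_rfl,
    List.take_of_length_le (by simp [List.length_zip])]
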